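-- pv_equiv track=rewrite | github.com/DerSerhii/storage | set_reducer.py | set_reducer_1
-- ===== SOURCE A (Python) =====
-- def set_reducer_1(inp: list) -> int:
--     while len(inp) != 1:
--         n = 1
--         res = []
--         for i, elem in enumerate(inp):
--             try:
--                 if inp[i] != inp[i + 1]:
--                     res.append(n)
--                     n = 1
--                 else:
--                     n += 1
--             except IndexError:
--                 if inp[i] != inp[i - 1]:
--                     res.append(1)
--                 else:
--                     res.append(n)
--         inp = res
--     return inp[0]
-- ===== SOURCE B (Python) =====
-- def set_reducer_1(inp: list) -> int:
--     while len(inp) != 1: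
--         b = [0]
--         for i in range(len(inp) - 1):
--             if inp[i] != inp[i + 1]:
--                 b.append(i + 1)
--         b.append(len(inp))
--         inp = [b[k + 1] - b[k] for k in range(len(b) - 1)]
--     return inp[0]
-- ===== Notes on version B (the rewrite author's own statement) =====
-- stated objective: alternative
-- what changed: Each pass is recast from A's fused count-as-you-go scan (run counter n, inp[i+1] probed under try/except IndexError, three append cases) into two phases: first build the list of run-boundary indices [0, ...cuts..., len(inp)], then emit the run lengths as consecutive differences of that boundary list.
import Mathlib
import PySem

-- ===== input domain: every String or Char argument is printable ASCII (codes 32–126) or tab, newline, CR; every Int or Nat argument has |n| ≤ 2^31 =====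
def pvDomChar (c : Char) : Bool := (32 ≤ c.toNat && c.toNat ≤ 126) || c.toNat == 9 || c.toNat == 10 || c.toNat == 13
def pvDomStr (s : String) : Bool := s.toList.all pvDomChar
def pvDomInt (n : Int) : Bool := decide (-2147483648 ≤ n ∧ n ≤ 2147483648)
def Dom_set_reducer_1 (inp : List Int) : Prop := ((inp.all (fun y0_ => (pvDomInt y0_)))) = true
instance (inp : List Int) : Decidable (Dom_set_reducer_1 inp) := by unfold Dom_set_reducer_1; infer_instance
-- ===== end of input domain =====

-- B replaces A's fused count-as-you-go scan (with its IndexError trick) by a two-phase pass: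
-- collect the run-boundary indices, then take consecutive differences (objective: alternative).

-- ===== PORT A =====
-- one iteration of A's for-loop body: state (n, res), index i; inp[i+1] raising IndexError = pyGet? none
def pvStepA (inp : List Int) (st : Int × List Int) (i : Nat) : Int × List Int :=
  match PySem.List.pyGet? inp ((i : Int) + 1) with
  | some nxt => if inp.getD i 0 ≠ nxt then (1, st.2 ++ [st.1]) else (st.1 + 1, st.2)
  | none =>
      if PySem.List.pyGet? inp ((i : Int)) ≠ PySem.List.pyGet? inp ((i : Int) - 1)
      then (st.1, st.2 ++ [1]) else (st.1, st.2 ++ [st.1])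

-- one pass of A's while-body (n = 1; res = []; for i, elem in enumerate(inp): …)
def pvPassA (inp : List Int) : List Int :=
  ((List.range inp.length).foldl (pvStepA inp) (1, [])).2

-- A's while-loop; fuel only makes the recursion total (A diverges on [], excluded by Pre_)
def pvLoopA : Nat → List Int → Int
  | 0, inp => PySem.List.pyGetD inp 0 0
  | f+1, inp => if inp.length = 1 then PySem.List.pyGetD inp 0 0 else pvLoopA f (pvPassA inp)

def set_reducer_1 (inp : List Int) : Int := pvLoopA (inp.length + 2) inp

-- ===== PORT B =====
-- phase 1 of B: b = [0]; for i in range(len(inp)-1): if inp[i] != inp[i+1]: b.append(i+1)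
def pvCuts (inp : List Int) : List Int :=
  (List.range (inp.length - 1)).foldl
    (fun b i => if inp.getD i 0 ≠ inp.getD (i + 1) 0 then b ++ [(i : Int) + 1] else b) [0]

-- … ; b.append(len(inp))
def pvBnd (inp : List Int) : List Int := pvCuts inp ++ [(inp.length : Int)]

-- phase 2 of B: [b[k+1] - b[k] for k in range(len(b)-1)]
def pvDiffs (b : List Int) : List Int :=
  (List.range (b.length - 1)).map (fun k => b.getD (k + 1) 0 - b.getD k 0)

def pvPassB (inp : List Int) : List Int := pvDiffs (pvBnd inp)

-- B's while-loop, same fuel shape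
def pvLoopB : Nat → List Int → Int
  | 0, inp => PySem.List.pyGetD inp 0 0
  | f+1, inp => if inp.length = 1 then PySem.List.pyGetD inp 0 0 else pvLoopB f (pvPassB inp)

def set_reducer_1_alt (inp : List Int) : Int := pvLoopB (inp.length + 2) inp

-- ===== PRECONDITION & SPEC =====
-- Pre_ excludes only the empty list, on which A's while-loop never terminates (no value is returned).
def Pre_set_reducer_1 (inp : List Int) : Prop := inp ≠ []
instance (inp : List Int) : Decidable (Pre_set_reducer_1 inp) := by unfold Pre_set_reducer_1; infer_instance
def pvWitness_set_reducer_1 : List Int := [1, 1, 2]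

def Spec_set_reducer_1 (inp : List Int) (out : Int) : Prop := out = set_reducer_1_alt inp
instance (inp : List Int) (out : Int) : Decidable (Spec_set_reducer_1 inp out) := by unfold Spec_set_reducer_1; infer_instance

-- ===== CLAIM (what is proved, stated in full; the proofs are below) =====
def Claim_equal_set_reducer_1 : Prop := ∀ (inp : List Int), Dom_set_reducer_1 inp → Pre_set_reducer_1 inp → Spec_set_reducer_1 inp (set_reducer_1 inp)

-- ===== LEMMAS AND PROOFS =====

-- prefix of B's boundary fold, after the first j loop iterations
def pvCutsUpTo (inp : List Int) (j : Nat) : List Int :=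
  (List.range j).foldl
    (fun b i => if inp.getD i 0 ≠ inp.getD (i + 1) 0 then b ++ [(i : Int) + 1] else b) [0]

theorem pvCuts_eq (inp : List Int) : pvCuts inp = pvCutsUpTo inp (inp.length - 1) := rfl

theorem pvCutsUpTo_succ (inp : List Int) (j : Nat) :
    pvCutsUpTo inp (j + 1) =
      if inp.getD j 0 ≠ inp.getD (j + 1) 0 then pvCutsUpTo inp j ++ [(j : Int) + 1]
      else pvCutsUpTo inp j := by
  unfold pvCutsUpTo
  rw [List.range_succ, List.foldl_append, List.foldl_cons, List.foldl_nil]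

theorem pvCutsUpTo_ne_nil (inp : List Int) (j : Nat) : pvCutsUpTo inp j ≠ [] := by
  induction j with
  | zero => simp [pvCutsUpTo]
  | succ j ih =>
      rw [pvCutsUpTo_succ]
      split
      · simp
      · exact ih

theorem pvDiffs_snoc (b : List Int) (x : Int) (h : b ≠ []) :
    pvDiffs (b ++ [x]) = pvDiffs b ++ [x - b.getLastD 0] := by
  unfold pvDiffs
  have hb : 0 < b.length := List.length_pos_iff.mpr h
  have h1 : (b ++ [x]).length - 1 = (b.length - 1) + 1 := by simp; omega
  rw [h1, List.range_succ, List.map_append]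
  congr 1
  · apply List.map_congr_left
    intro k hk
    have hk' : k < b.length - 1 := List.mem_range.mp hk
    rw [List.getD_append _ _ _ _ (by omega), List.getD_append _ _ _ _ (by omega)]
  · simp only [List.map_cons, List.map_nil]
    have e1 : (b ++ [x]).getD (b.length - 1 + 1) 0 = x := by
      rw [show b.length - 1 + 1 = b.length from by omega]
      simp
    have e2 : (b ++ [x]).getD (b.length - 1) 0 = b.getLastD 0 := by
      rw [List.getD_append _ _ _ _ (by omega), List.getLastD_eq_getLast?,
        List.getLast?_eq_getElem?, List.getD_eq_getElem?_getD]
    rw [e1, e2]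

-- loop invariant for A's pass over the first j iterations (while the try never failed)
theorem pvInv (inp : List Int) (j : Nat) (hj : j ≤ inp.length - 1) :
    (List.range j).foldl (pvStepA inp) (1, []) =
      ((j : Int) + 1 - (pvCutsUpTo inp j).getLastD 0, pvDiffs (pvCutsUpTo inp j)) := by
  induction j with
  | zero => simp [pvCutsUpTo, pvDiffs]
  | succ j ih =>
      have hjlt : j + 1 < inp.length := by omega
      rw [List.range_succ, List.foldl_append, List.foldl_cons, List.foldl_nil, ih (by omega)]
      have hsome : PySem.List.pyGet? inp ((j : Int) + 1) = some (inp.getD (j + 1) 0) := by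
        rw [show ((j : Int) + 1) = ((j + 1 : Nat) : Int) from by push_cast; ring,
          PySem.List.pyGet?_natCast, List.getElem?_eq_getElem hjlt,
          List.getD_eq_getElem _ _ hjlt]
      rw [pvCutsUpTo_succ]
      simp only [pvStepA, hsome]
      split
      · rw [pvDiffs_snoc _ _ (pvCutsUpTo_ne_nil inp j)]
        have hl : (pvCutsUpTo inp j ++ [(j : Int) + 1]).getLastD 0 = (j : Int) + 1 := by simp
        rw [hl]
        simp only [Prod.mk.injEq]
        exact ⟨by push_cast; ring, trivial⟩
      · simp only [Prod.mk.injEq]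
        exact ⟨by push_cast; ring, trivial⟩

theorem pvPassB_eq (inp : List Int) (_h : inp ≠ []) :
    pvPassB inp =
      pvDiffs (pvCutsUpTo inp (inp.length - 1)) ++
        [(inp.length : Int) - (pvCutsUpTo inp (inp.length - 1)).getLastD 0] := by
  unfold pvPassB pvBnd
  rw [pvCuts_eq, pvDiffs_snoc _ _ (pvCutsUpTo_ne_nil inp _)]

theorem pvPass_eq (inp : List Int) (h : inp ≠ []) : pvPassA inp = pvPassB inp := by
  have hb := pvPassB_eq inp h
  have hlen : 1 ≤ inp.length := List.length_pos_iff.mpr h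
  rcases Nat.lt_or_ge inp.length 2 with h1 | h2
  · -- length = 1
    obtain ⟨x, hx⟩ : ∃ x, inp = [x] := by
      match inp, hlen, h1 with
      | [x], _, _ => exact ⟨x, rfl⟩
    subst hx
    simp [pvPassA, pvPassB, pvStepA, pvBnd, pvCuts, pvDiffs, PySem.List.pyGet?,
      PySem.List.pyIdx?, List.range_succ]
  · -- length ≥ 2
    unfold pvPassA
    rw [show List.range inp.length = List.range (inp.length - 1) ++ [inp.length - 1] from by
          rw [← List.range_succ]; congr 1; omega,
      List.foldl_append, List.foldl_cons, List.foldl_nil, pvInv inp (inp.length - 1) le_rfl]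
    have hnone : PySem.List.pyGet? inp (((inp.length - 1 : Nat) : Int) + 1) = none := by
      rw [show (((inp.length - 1 : Nat) : Int) + 1) = ((inp.length : Nat) : Int) from by omega,
        PySem.List.pyGet?_natCast]
      exact List.getElem?_eq_none le_rfl
    have hlast : PySem.List.pyGet? inp ((inp.length - 1 : Nat) : Int) =
        some inp[inp.length - 1] := by
      rw [PySem.List.pyGet?_natCast]
      exact List.getElem?_eq_getElem (by omega)
    have hprev : PySem.List.pyGet? inp (((inp.length - 1 : Nat) : Int) - 1) =
        some inp[inp.length - 2] := by
      rw [show (((inp.length - 1 : Nat) : Int) - 1) = ((inp.length - 2 : Nat) : Int) from by omega,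
        PySem.List.pyGet?_natCast]
      exact List.getElem?_eq_getElem (by omega)
    simp only [pvStepA, hnone, hlast, hprev]
    by_cases hc : inp[inp.length - 1] = inp[inp.length - 2]
    · rw [if_neg (by simp [hc]), hb,
        show ((inp.length - 1 : Nat) : Int) + 1 = (inp.length : Int) from by omega]
    · rw [if_pos (by simp [hc]), hb]
      have hcuts : pvCutsUpTo inp (inp.length - 1) =
          pvCutsUpTo inp (inp.length - 2) ++ [((inp.length - 2 : Nat) : Int) + 1] := by
        rw [show inp.length - 1 = (inp.length - 2) + 1 from by omega, pvCutsUpTo_succ,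
          if_pos]
        rw [show inp.length - 2 + 1 = inp.length - 1 from by omega,
          List.getD_eq_getElem _ _ (by omega : inp.length - 2 < inp.length),
          List.getD_eq_getElem _ _ (by omega : inp.length - 1 < inp.length)]
        exact fun he => hc he.symm
      rw [hcuts]
      have hl : (pvCutsUpTo inp (inp.length - 2) ++ [((inp.length - 2 : Nat) : Int) + 1]).getLastD 0
          = ((inp.length - 2 : Nat) : Int) + 1 := by simp
      rw [hl, show (inp.length : Int) - (((inp.length - 2 : Nat) : Int) + 1) = 1 from by omega]

theorem pvPassB_ne_nil (inp : List Int) (_h : inp ≠ []) : pvPassB inp ≠ [] := by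
  have h1 : pvCutsUpTo inp (inp.length - 1) ≠ [] := pvCutsUpTo_ne_nil inp _
  have h2 : 0 < (pvCutsUpTo inp (inp.length - 1)).length := List.length_pos_iff.mpr h1
  intro hc
  have := congrArg List.length hc
  simp [pvPassB, pvDiffs, pvBnd, pvCuts_eq] at this
  exact h1 this

theorem pvLoop_eq (f : Nat) (inp : List Int) (h : inp ≠ []) : pvLoopA f inp = pvLoopB f inp := by
  induction f generalizing inp with
  | zero => rfl
  | succ f ih =>
      simp only [pvLoopA, pvLoopB]
      split
      · rfl
      · rw [pvPass_eq inp h]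
        exact ih _ (pvPassB_ne_nil inp h)

-- ===== VERDICT (by name: the statement is the Claim_ definition above) =====
theorem set_reducer_1_spec : Claim_equal_set_reducer_1 := by
  intro inp _ hpre
  unfold Spec_set_reducer_1 set_reducer_1 set_reducer_1_alt
  exact pvLoop_eq _ inp hpre
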